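-- pv_equiv track=rewrite | github.com/AlphabetzInc/DPP | topcoder/srm/609div2/PackingBallsDiv2.py | minPacks
-- ===== SOURCE A (Python) =====
-- def minPacks(R, G, B):
--     A = [R,G,B]
--     c = 0
--     A.sort()
--     while A[2] > 3:
--         A[2] -= 3
--         c += 1
--         A.sort()
--     if A[2] == 2:
--         c += 2
--     elif A[2] == 3 and A[1] >= 2:
--         c += 3
--     elif A[2] == 3 and A[1] == 1:
--         c += 2
--     else:
--         assert(A[2] == 1)
--         c += 1
--     return c
-- ===== SOURCE B (Python) =====
-- def minPacks(R, G, B):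
--     # O(1): reduce each pile to its representative in [1,3] (piles <= 0 untouched),
--     # count the full packs removed by floor division, then apply the leftover table.
--     def rep(v):
--         return v if v <= 0 else (v - 1) % 3 + 1
--     def packs(v):
--         return 0 if v <= 0 else (v - 1) // 3
--     c = packs(R) + packs(G) + packs(B)
--     a0, a1, a2 = sorted((rep(R), rep(G), rep(B)))
--     if a2 == 2:
--         return c + 2
--     if a2 == 3 and a1 >= 2:
--         return c + 3
--     if a2 == 3 and a1 == 1:
--         return c + 2
--     return c + 1
-- ===== Notes on version B (the rewrite author's own statement) =====
-- stated objective: faster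
-- what changed: Replaced the subtract-3-from-the-max-and-resort loop by an O(1) closed form: each pile's contribution of full packs is (v-1)//3 and its leftover representative in [1,3] is (v-1)%3+1, then the same leftover table is applied to the sorted representatives.
import Mathlib
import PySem

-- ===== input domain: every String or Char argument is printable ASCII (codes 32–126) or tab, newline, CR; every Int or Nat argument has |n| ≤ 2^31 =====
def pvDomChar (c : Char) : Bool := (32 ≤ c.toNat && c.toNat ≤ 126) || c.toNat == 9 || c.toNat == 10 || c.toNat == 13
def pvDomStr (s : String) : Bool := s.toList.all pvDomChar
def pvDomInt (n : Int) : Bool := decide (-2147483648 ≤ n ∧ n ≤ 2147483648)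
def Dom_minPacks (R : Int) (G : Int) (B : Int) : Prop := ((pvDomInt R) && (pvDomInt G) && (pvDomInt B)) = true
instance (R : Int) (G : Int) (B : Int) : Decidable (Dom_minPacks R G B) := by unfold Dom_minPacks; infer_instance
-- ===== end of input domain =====

-- B replaces A's subtract-3-from-the-max-and-resort loop by an O(1) closed form
-- ((v-1)//3 full packs per pile, leftover representative (v-1)%3+1); same leftover table.

-- shared helper: sorting a 3-element list of ints (Python's list.sort on [x,y,z]),
-- written out as the explicit comparison chain
def sort3 (x : Int) (y : Int) (z : Int) : Int × Int × Int :=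
  if x ≤ y then
    (if y ≤ z then (x, y, z) else if x ≤ z then (x, z, y) else (z, x, y))
  else
    (if x ≤ z then (y, x, z) else if y ≤ z then (y, z, x) else (z, y, x))

-- shared helper: the final if/elif table applied to the sorted leftovers (mid a1, max a2);
-- Python's failing-assert branch is lumped into the last case and excluded by Pre_
def tailPacks (a1 : Int) (a2 : Int) : Int :=
  if a2 = 2 then 2
  else if a2 = 3 ∧ a1 ≥ 2 then 3
  else if a2 = 3 ∧ a1 = 1 then 2
  else 1

-- ===== PORT A =====
-- the while loop of A: state is the sorted triple (a0 ≤ a1 ≤ a2 at every entry) and counter c;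
-- fuel only makes the recursion structural: minPacks passes enough fuel that it is never exhausted
def loopA (fuel : Nat) (a0 : Int) (a1 : Int) (a2 : Int) (c : Int) : Int :=
  match fuel with
  | 0 => c + tailPacks a1 a2
  | n + 1 =>
    if a2 > 3 then
      loopA n (sort3 a0 a1 (a2 - 3)).1 (sort3 a0 a1 (a2 - 3)).2.1 (sort3 a0 a1 (a2 - 3)).2.2 (c + 1)
    else
      c + tailPacks a1 a2

def minPacks (R : Int) (G : Int) (B : Int) : Int :=
  loopA ((R - 1).toNat + (G - 1).toNat + (B - 1).toNat)
    (sort3 R G B).1 (sort3 R G B).2.1 (sort3 R G B).2.2 0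

-- ===== PORT B =====
-- rep v: the leftover of pile v after removing its full packs of 3 (in [1,3] for v > 0)
def repB (v : Int) : Int := if v ≤ 0 then v else PySem.Int.mod (v - 1) 3 + 1
-- packs v: the number of full packs of 3 taken greedily from pile v
def packsB (v : Int) : Int := if v ≤ 0 then 0 else PySem.Int.floordiv (v - 1) 3

def minPacks_alt (R : Int) (G : Int) (B : Int) : Int :=
  packsB R + packsB G + packsB B +
    tailPacks (sort3 (repB R) (repB G) (repB B)).2.1 (sort3 (repB R) (repB G) (repB B)).2.2

-- ===== PRECONDITION & SPEC =====
-- Pre_ excludes exactly the inputs on which A's assert fails (AssertionError): those whose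
-- sorted leftover triple has max ≤ 0, or max = 3 with middle ≤ 0.
def Pre_minPacks (R : Int) (G : Int) (B : Int) : Prop :=
  (max (repB R) (max (repB G) (repB B)) = 1) ∨
  (max (repB R) (max (repB G) (repB B)) = 2) ∨
  (max (repB R) (max (repB G) (repB B)) = 3 ∧
    1 ≤ repB R + repB G + repB B
          - max (repB R) (max (repB G) (repB B)) - min (repB R) (min (repB G) (repB B)))
instance (R : Int) (G : Int) (B : Int) : Decidable (Pre_minPacks R G B) := by
  unfold Pre_minPacks; infer_instance

def pvWitness_minPacks : Int × Int × Int := (1, 1, 1)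

def Spec_minPacks (R : Int) (G : Int) (B : Int) (out : Int) : Prop := out = minPacks_alt R G B
instance (R : Int) (G : Int) (B : Int) (out : Int) : Decidable (Spec_minPacks R G B out) := by
  unfold Spec_minPacks; infer_instance

-- ===== CLAIM (what is proved, stated in full; the proofs are below) =====
def Claim_equal_minPacks : Prop := ∀ (R : Int) (G : Int) (B : Int), Dom_minPacks R G B → Pre_minPacks R G B → Spec_minPacks R G B (minPacks R G B)

-- ===== LEMMAS AND PROOFS =====

-- the loop measure is permutation invariant (used to justify the fuel bound in the proofs)
lemma sort3_measure (x y z : Int) :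
    ((sort3 x y z).1 - 1).toNat + ((sort3 x y z).2.1 - 1).toNat + ((sort3 x y z).2.2 - 1).toNat
      = (x - 1).toNat + (y - 1).toNat + (z - 1).toNat := by
  unfold sort3; split_ifs <;> simp <;> omega

lemma triple_ext (p q : Int × Int × Int) (h1 : p.1 = q.1) (h2 : p.2.1 = q.2.1)
    (h3 : p.2.2 = q.2.2) : p = q := by
  obtain ⟨a, b, c⟩ := p; obtain ⟨d, e, f⟩ := q; simp_all

lemma sort3_fst (x y z : Int) : (sort3 x y z).1 = min x (min y z) := by
  unfold sort3; split_ifs <;> simp <;> omega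

lemma sort3_trd (x y z : Int) : (sort3 x y z).2.2 = max x (max y z) := by
  unfold sort3; split_ifs <;> simp <;> omega

lemma sort3_snd (x y z : Int) :
    (sort3 x y z).2.1 = x + y + z - min x (min y z) - max x (max y z) := by
  unfold sort3; split_ifs <;> simp <;> omega

lemma sort3_sorted (x y z : Int) :
    (sort3 x y z).1 ≤ (sort3 x y z).2.1 ∧ (sort3 x y z).2.1 ≤ (sort3 x y z).2.2 := by
  rw [sort3_fst, sort3_snd, sort3_trd]; omega

lemma sort3_of_sorted (x y z : Int) (hxy : x ≤ y) (hyz : y ≤ z) : sort3 x y z = (x, y, z) :=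
  triple_ext _ _ (by simp only [sort3_fst]; omega) (by simp only [sort3_snd]; omega)
    (by simp only [sort3_trd]; omega)

lemma sort3_swap12 (x y z : Int) : sort3 x y z = sort3 y x z :=
  triple_ext _ _ (by rw [sort3_fst, sort3_fst]; omega)
    (by rw [sort3_snd, sort3_snd]; omega) (by rw [sort3_trd, sort3_trd]; omega)

lemma sort3_swap23 (x y z : Int) : sort3 x y z = sort3 x z y :=
  triple_ext _ _ (by rw [sort3_fst, sort3_fst]; omega)
    (by rw [sort3_snd, sort3_snd]; omega) (by rw [sort3_trd, sort3_trd]; omega)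

-- sort3 returns one of the six arrangements of its arguments
lemma sort3_cases (x y z : Int) :
    sort3 x y z = (x, y, z) ∨ sort3 x y z = (x, z, y) ∨ sort3 x y z = (y, x, z) ∨
    sort3 x y z = (y, z, x) ∨ sort3 x y z = (z, x, y) ∨ sort3 x y z = (z, y, x) := by
  unfold sort3; split_ifs <;> simp

-- the sum of an f-image over the components of sort3 is permutation invariant
lemma sort3_sum_f (f : Int → Int) (x y z : Int) :
    f (sort3 x y z).1 + f (sort3 x y z).2.1 + f (sort3 x y z).2.2 = f x + f y + f z := by
  rcases sort3_cases x y z with h | h | h | h | h | h <;> rw [h] <;> ring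

-- re-sorting the f-image of an already sorted triple equals sorting the f-image of the inputs
lemma sort3_map_f (f : Int → Int) (x y z : Int) :
    sort3 (f (sort3 x y z).1) (f (sort3 x y z).2.1) (f (sort3 x y z).2.2)
      = sort3 (f x) (f y) (f z) := by
  rcases sort3_cases x y z with h | h | h | h | h | h <;> rw [h] <;> dsimp only
  · exact (sort3_swap23 (f x) (f y) (f z)).symm
  · exact (sort3_swap12 (f x) (f y) (f z)).symm
  · exact (sort3_swap23 (f y) (f z) (f x)).trans (sort3_swap12 (f y) (f x) (f z))
  · exact (sort3_swap12 (f z) (f x) (f y)).trans (sort3_swap23 (f x) (f z) (f y))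
  · exact (sort3_swap12 (f z) (f y) (f x)).trans
      ((sort3_swap23 (f y) (f z) (f x)).trans (sort3_swap12 (f y) (f x) (f z)))

lemma repB_small (v : Int) (h : v ≤ 3) : repB v = v := by
  unfold repB; split_ifs with h0
  · rfl
  · rw [PySem.Int.mod_eq_emod_of_pos (by norm_num : (0:Int) < 3)]; omega

lemma packsB_small (v : Int) (h : v ≤ 3) : packsB v = 0 := by
  unfold packsB; split_ifs with h0
  · rfl
  · rw [PySem.Int.floordiv_eq_ediv_of_pos (by norm_num : (0:Int) < 3)]; omega

lemma repB_sub3 (v : Int) (h : 3 < v) : repB (v - 3) = repB v := by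
  unfold repB
  rw [if_neg (by omega), if_neg (by omega),
    PySem.Int.mod_eq_emod_of_pos (by norm_num : (0:Int) < 3),
    PySem.Int.mod_eq_emod_of_pos (by norm_num : (0:Int) < 3)]
  omega

lemma packsB_sub3 (v : Int) (h : 3 < v) : packsB (v - 3) = packsB v - 1 := by
  unfold packsB
  rw [if_neg (by omega), if_neg (by omega),
    PySem.Int.floordiv_eq_ediv_of_pos (by norm_num : (0:Int) < 3),
    PySem.Int.floordiv_eq_ediv_of_pos (by norm_num : (0:Int) < 3)]
  omega

-- loop invariant: on a sorted state, with fuel at least a third of the measure,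
-- loopA returns the counter plus the closed form
lemma loopA_closed : ∀ (n : Nat) (a0 a1 a2 c : Int),
    (a0 - 1).toNat + (a1 - 1).toNat + (a2 - 1).toNat ≤ 3 * n → a0 ≤ a1 → a1 ≤ a2 →
    loopA n a0 a1 a2 c = c + packsB a0 + packsB a1 + packsB a2 +
      tailPacks (sort3 (repB a0) (repB a1) (repB a2)).2.1
                (sort3 (repB a0) (repB a1) (repB a2)).2.2 := by
  intro n
  induction n with
  | zero =>
    intro a0 a1 a2 c hm h01 h12
    show c + tailPacks a1 a2 = _
    rw [packsB_small _ (by omega), packsB_small _ (by omega), packsB_small _ (by omega),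
      repB_small _ (by omega), repB_small _ (by omega), repB_small _ (by omega),
      sort3_of_sorted _ _ _ h01 h12]
    ring
  | succ n ih =>
    intro a0 a1 a2 c hm h01 h12
    show (if a2 > 3 then _ else c + tailPacks a1 a2) = _
    split_ifs with h
    · have hs := sort3_sorted a0 a1 (a2 - 3)
      rw [ih _ _ _ _ (by rw [sort3_measure]; omega) hs.1 hs.2]
      rw [sort3_map_f repB a0 a1 (a2 - 3), repB_sub3 _ h]
      have h1 := sort3_sum_f packsB a0 a1 (a2 - 3)
      rw [packsB_sub3 _ h] at h1
      omega
    · rw [packsB_small _ (by omega), packsB_small _ (by omega), packsB_small _ (by omega),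
        repB_small _ (by omega), repB_small _ (by omega), repB_small _ (by omega),
        sort3_of_sorted _ _ _ h01 h12]
      ring

-- ===== VERDICT (by name: the statement is the Claim_ definition above) =====
theorem minPacks_spec : Claim_equal_minPacks := by
  intro R G B _ _
  unfold Spec_minPacks minPacks minPacks_alt
  have hs := sort3_sorted R G B
  rw [loopA_closed _ _ _ _ _ (by rw [sort3_measure]; omega) hs.1 hs.2]
  rw [sort3_map_f repB R G B]
  have h1 := sort3_sum_f packsB R G B
  omega
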